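-- pv_equiv track=rewrite | github.com/daviddoret/punctilious | sandbox/test4.py | _rank_within_sum_class
-- ===== SOURCE A (Python) =====
-- from typing import List
-- from math import comb
--
-- def _rank_within_sum_class(sequence: List[int]) -> int:
--     """
--     Rank a sequence among all sequences with the same adjusted sum.
--     Returns 0-based rank within the sum class.
--     """
--     if not sequence:
--         return 0
--
--     adjusted_sum = sum(sequence) + len(sequence)
--     rank_value = 0
--
--     # Try all possible shorter lengths first
--     for length in range(1, len(sequence)):
--         rank_value += _count_sequences_with_sum_and_length(adjusted_sum, length)
--
--     # Now rank within sequences of the same length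
--     rank_value += _rank_within_length_class(sequence, adjusted_sum, len(sequence))
--
--     return rank_value
--
-- def _count_sequences_with_sum_and_length(adjusted_sum: int, length: int) -> int:
--     """
--     Count sequences with specific adjusted sum and length.
--     Using stars and bars: we need to place (adjusted_sum - length) extra units
--     among length positions, which is C(adjusted_sum - 1, length - 1).
--     """
--     if length <= 0 or adjusted_sum < length:
--         return 0
--     return comb(adjusted_sum - 1, length - 1)
--
-- def _rank_within_length_class(sequence: List[int], adjusted_sum: int, length: int) -> int:
--     """
--     Rank a sequence among sequences of the same adjusted sum and length.
--     Uses lexicographic ordering.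
--     """
--     if length == 1:
--         return 0  # Only one sequence of length 1 for given sum
--
--     rank_value = 0
--     remaining_sum = adjusted_sum
--     remaining_length = length
--
--     for i, element in enumerate(sequence):
--         # Count sequences that have smaller values at position i
--         min_value = 0  # Minimum original value
--
--         for smaller_value in range(min_value, element):
--             # Calculate remaining sum after placing smaller_value at position i
--             new_remaining_sum = remaining_sum - (smaller_value + 1)
--             new_remaining_length = remaining_length - 1
--
--             # Count valid completions
--             if new_remaining_length == 0:
--                 if new_remaining_sum == 0:
--                     rank_value += 1
--             else:
--                 # Must have at least 1 (adjusted) for each remaining position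
--                 if new_remaining_sum >= new_remaining_length:
--                     rank_value += _count_sequences_with_sum_and_length(
--                         new_remaining_sum, new_remaining_length
--                     )
--
--         # Update for next iteration
--         remaining_sum -= (element + 1)
--         remaining_length -= 1
--
--     return rank_value
-- ===== SOURCE B (Python) =====
-- from math import comb
--
-- def _rank_within_sum_class(sequence):
--     """Same rank, but the per-position scan over smaller values is replaced by a
--     hockey-stick closed form, so each position costs O(1) comb calls."""
--     if not sequence:
--         return 0
--     n = len(sequence)
--     s = sum(sequence) + n
--     # sequences of strictly shorter length, stars and bars per length
--     rank = sum(comb(s - 1, l - 1) for l in range(1, n) if s >= l)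
--     rem_sum, rem_len = s, n
--     for e in sequence:
--         tail = rem_len - 1
--         if tail == 0:
--             if 0 <= rem_sum - 1 < e:
--                 rank += 1
--         else:
--             hi = min(e - 1, rem_sum - 1 - tail)
--             if hi >= 0:
--                 # sum_{v=0}^{hi} C(rem_sum - v - 2, tail - 1)  (hockey stick)
--                 rank += comb(rem_sum - 1, tail) - comb(rem_sum - hi - 2, tail)
--         rem_sum -= e + 1
--         rem_len -= 1
--     return rank
-- ===== Notes on version B (the rewrite author's own statement) =====
-- stated objective: faster
-- what changed: The inner loop over every smaller value at each position (O(max_element) comb calls) is replaced by a hockey-stick closed form using at most two comb calls per position.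
import Mathlib
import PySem

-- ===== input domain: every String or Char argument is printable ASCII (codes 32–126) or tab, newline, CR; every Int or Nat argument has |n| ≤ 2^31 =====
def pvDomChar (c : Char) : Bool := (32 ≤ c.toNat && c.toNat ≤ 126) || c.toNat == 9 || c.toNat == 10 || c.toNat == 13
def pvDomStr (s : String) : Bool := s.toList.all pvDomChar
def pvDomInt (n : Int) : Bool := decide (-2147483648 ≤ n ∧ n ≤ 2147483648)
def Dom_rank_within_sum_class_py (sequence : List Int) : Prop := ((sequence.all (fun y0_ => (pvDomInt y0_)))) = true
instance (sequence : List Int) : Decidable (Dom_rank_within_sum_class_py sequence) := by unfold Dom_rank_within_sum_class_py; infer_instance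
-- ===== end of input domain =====

-- B replaces A's per-position scan over all smaller values by a hockey-stick
-- closed form (at most two comb calls per position); objective: faster.

-- ===== PORT A =====
-- math.comb; both Pythons only call it with nonnegative arguments, where Int.toNat is exact
def pvComb (n k : Int) : Int := (Nat.choose n.toNat k.toNat : Int)

def countSeqWithSumAndLength (adjustedSum length : Int) : Int :=
  if length ≤ 0 ∨ adjustedSum < length then 0
  else pvComb (adjustedSum - 1) (length - 1)

-- one iteration of A's 'for i, element in enumerate(sequence)' loop; state (rank, remSum, remLen)
def pvStepA (st : Int × Int × Int) (element : Int) : Int × Int × Int :=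
  ((PySem.List.pyRange 0 element 1).foldl (fun r smallerValue =>
      if st.2.2 - 1 = 0 then (if st.2.1 - (smallerValue + 1) = 0 then r + 1 else r)
      else (if st.2.1 - (smallerValue + 1) ≥ st.2.2 - 1
            then r + countSeqWithSumAndLength (st.2.1 - (smallerValue + 1)) (st.2.2 - 1)
            else r)) st.1,
   st.2.1 - (element + 1), st.2.2 - 1)

def rankWithinLengthClass (sequence : List Int) (adjustedSum length : Int) : Int :=
  if length = 1 then 0
  else (sequence.foldl pvStepA (0, adjustedSum, length)).1

def rank_within_sum_class_py (sequence : List Int) : Int :=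
  if sequence = [] then 0
  else
    (PySem.List.pyRange 1 sequence.length 1).foldl
      (fun r length => r + countSeqWithSumAndLength (sequence.sum + sequence.length) length) 0
    + rankWithinLengthClass sequence (sequence.sum + sequence.length) sequence.length

-- ===== PORT B =====
-- one iteration of B's loop; state (rank, remSum, remLen); tail = remLen - 1
def pvStepB (st : Int × Int × Int) (e : Int) : Int × Int × Int :=
  (if st.2.2 - 1 = 0 then
     (if 0 ≤ st.2.1 - 1 ∧ st.2.1 - 1 < e then st.1 + 1 else st.1)
   else
     (if 0 ≤ min (e - 1) (st.2.1 - 1 - (st.2.2 - 1)) then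
        st.1 + (pvComb (st.2.1 - 1) (st.2.2 - 1)
                - pvComb (st.2.1 - min (e - 1) (st.2.1 - 1 - (st.2.2 - 1)) - 2) (st.2.2 - 1))
      else st.1),
   st.2.1 - (e + 1), st.2.2 - 1)

def rank_within_sum_class_py_alt (sequence : List Int) : Int :=
  if sequence = [] then 0
  else
    (sequence.foldl pvStepB
      ((((PySem.List.pyRange 1 sequence.length 1).filter
           (fun l => decide (sequence.sum + sequence.length ≥ l))).map
          (fun l => pvComb (sequence.sum + sequence.length - 1) (l - 1))).sum,
       sequence.sum + sequence.length, sequence.length)).1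

-- ===== PRECONDITION & SPEC =====
def Spec_rank_within_sum_class_py (sequence : List Int) (out : Int) : Prop := out = rank_within_sum_class_py_alt sequence
instance (sequence : List Int) (out : Int) : Decidable (Spec_rank_within_sum_class_py sequence out) := by unfold Spec_rank_within_sum_class_py; infer_instance

-- ===== CLAIM (what is proved, stated in full; the proofs are below) =====
def Claim_equal_rank_within_sum_class_py : Prop := ∀ (sequence : List Int), Dom_rank_within_sum_class_py sequence → Spec_rank_within_sum_class_py sequence (rank_within_sum_class_py sequence)

-- ===== LEMMAS AND PROOFS =====

theorem pvComb_pascal (n k : Int) (hn : 1 ≤ n) (hk : 1 ≤ k) :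
    pvComb n k = pvComb (n-1) k + pvComb (n-1) (k-1) := by
  have h1 : n.toNat = (n-1).toNat + 1 := by omega
  have h2 : k.toNat = (k-1).toNat + 1 := by omega
  unfold pvComb
  rw [h1, h2, Nat.choose_succ_succ]
  push_cast; ring

theorem innerA_zero (m : Nat) (rs r : Int) :
    (PySem.List.pyRange 0 (m:Int) 1).foldl
      (fun r v => if rs - (v + 1) = 0 then r + 1 else r) r
    = r + (if 0 ≤ rs - 1 ∧ rs - 1 < (m:Int) then 1 else 0) := by
  induction m generalizing r with
  | zero =>
    rw [Nat.cast_zero, PySem.List.pyRange_one_eq_nil le_rfl]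
    simp only [List.foldl_nil]
    rw [if_neg (by omega)]; ring
  | succ m ih =>
    rw [Nat.cast_add, Nat.cast_one,
        PySem.List.pyRange_one_succ_right (by positivity), List.foldl_append, ih]
    simp only [List.foldl_cons, List.foldl_nil]
    split_ifs <;> omega

theorem innerA_pos (m : Nat) (rs t r : Int) (ht : 1 ≤ t) :
    (PySem.List.pyRange 0 (m:Int) 1).foldl
      (fun r v => if rs - (v + 1) ≥ t then r + countSeqWithSumAndLength (rs - (v + 1)) t else r) r
    = r + (if 0 ≤ min ((m:Int) - 1) (rs - 1 - t)
           then pvComb (rs - 1) t - pvComb (rs - min ((m:Int) - 1) (rs - 1 - t) - 2) t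
           else 0) := by
  induction m generalizing r with
  | zero =>
    rw [Nat.cast_zero, PySem.List.pyRange_one_eq_nil le_rfl]
    simp only [List.foldl_nil]
    rw [if_neg (by omega)]; ring
  | succ m ih =>
    rw [Nat.cast_add, Nat.cast_one,
        PySem.List.pyRange_one_succ_right (by positivity), List.foldl_append, ih]
    simp only [List.foldl_cons, List.foldl_nil]
    by_cases hg : rs - ((m:Int) + 1) ≥ t
    · have hcnt : countSeqWithSumAndLength (rs - ((m:Int) + 1)) t
          = pvComb (rs - (m:Int) - 2) (t - 1) := by
        unfold countSeqWithSumAndLength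
        rw [if_neg (by omega), show rs - ((m:Int) + 1) - 1 = rs - (m:Int) - 2 by ring]
      rw [if_pos hg, hcnt,
          show min ((m:Int) + 1 - 1) (rs - 1 - t) = (m:Int) by omega,
          if_pos (show (0:Int) ≤ (m:Int) by positivity)]
      by_cases hm1 : 1 ≤ (m:Int)
      · rw [show min ((m:Int) - 1) (rs - 1 - t) = (m:Int) - 1 by omega,
            if_pos (show (0:Int) ≤ (m:Int) - 1 by omega),
            show rs - ((m:Int) - 1) - 2 = rs - (m:Int) - 1 by ring]
        have hp := pvComb_pascal (rs - (m:Int) - 1) t (by omega) ht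
        rw [show rs - (m:Int) - 1 - 1 = rs - (m:Int) - 2 by ring] at hp
        omega
      · have hm0 : (m:Int) = 0 := by omega
        rw [if_neg (show ¬ (0:Int) ≤ min ((m:Int) - 1) (rs - 1 - t) by omega),
            hm0, show rs - (0:Int) - 2 = rs - 2 by ring]
        have hp := pvComb_pascal (rs - 1) t (by omega) ht
        rw [show rs - 1 - 1 = rs - 2 by ring] at hp
        omega
    · rw [if_neg hg,
          show min ((m:Int) + 1 - 1) (rs - 1 - t) = min ((m:Int) - 1) (rs - 1 - t) by omega]

theorem step_eq (r rs : Int) (t : Nat) (x : Int) :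
    pvStepA (r, rs, (t:Int) + 1) x = pvStepB (r, rs, (t:Int) + 1) x := by
  unfold pvStepA pvStepB
  simp only [show ((t:Int) + 1) - 1 = (t:Int) by ring]
  refine Prod.ext ?_ rfl
  by_cases hx : x ≤ 0
  · rw [PySem.List.pyRange_one_eq_nil hx]
    simp only [List.foldl_nil]
    split_ifs <;> first | rfl | (exfalso; omega)
  · have hxe : x = ((x.toNat : Nat) : Int) := by omega
    by_cases ht0 : (t:Int) = 0
    · simp only [ht0, if_true]
      rw [hxe, innerA_zero]
      split_ifs <;> omega
    · simp only [if_neg ht0]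
      rw [hxe, innerA_pos x.toNat rs t r (by omega)]
      split_ifs with h
      · ring
      · ring

theorem stepB_shift (r c rs l x : Int) :
    pvStepB (r + c, rs, l) x = ((pvStepB (r, rs, l) x).1 + c, rs - (x + 1), l - 1) := by
  unfold pvStepB
  dsimp only
  split_ifs <;> refine Prod.ext (by ring) rfl

theorem foldB_shift (xs : List Int) : ∀ r c rs l : Int,
    (xs.foldl pvStepB (r + c, rs, l)).1 = (xs.foldl pvStepB (r, rs, l)).1 + c := by
  induction xs with
  | nil => intro r c rs l; rfl
  | cons x xs ih =>
    intro r c rs l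
    rw [List.foldl_cons, List.foldl_cons, stepB_shift, ih,
        show pvStepB (r, rs, l) x = ((pvStepB (r, rs, l) x).1, rs - (x + 1), l - 1) from rfl]

theorem foldAB (xs : List Int) : ∀ r rs : Int,
    xs.foldl pvStepA (r, rs, (xs.length : Int)) = xs.foldl pvStepB (r, rs, (xs.length : Int)) := by
  induction xs with
  | nil => intro r rs; rfl
  | cons x xs ih =>
    intro r rs
    rw [List.foldl_cons, List.foldl_cons,
        show ((x :: xs).length : Int) = (xs.length : Int) + 1 by simp,
        step_eq r rs xs.length x,
        show pvStepB (r, rs, (xs.length : Int) + 1) x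
           = ((pvStepB (r, rs, (xs.length : Int) + 1) x).1, rs - (x + 1),
              ((xs.length : Int) + 1) - 1) from rfl,
        show ((xs.length : Int) + 1) - 1 = (xs.length : Int) by ring, ih]

theorem base_eq (S : Int) (ls : List Int) (h : ∀ l ∈ ls, 1 ≤ l) (r : Int) :
    ls.foldl (fun r l => r + countSeqWithSumAndLength S l) r
    = r + ((ls.filter (fun l => decide (S ≥ l))).map (fun l => pvComb (S - 1) (l - 1))).sum := by
  induction ls generalizing r with
  | nil => simp
  | cons l ls ih =>
    have hl : 1 ≤ l := h l (by simp)
    have h' : ∀ l' ∈ ls, 1 ≤ l' := fun l' hl' => h l' (by simp [hl'])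
    simp only [List.foldl_cons, List.filter_cons]
    by_cases hs : S ≥ l
    · rw [if_pos (by simpa using hs), ih h',
          show countSeqWithSumAndLength S l = pvComb (S - 1) (l - 1) from by
            unfold countSeqWithSumAndLength; rw [if_neg (by omega)]]
      simp; ring
    · rw [if_neg (by simpa using hs), ih h',
          show countSeqWithSumAndLength S l = 0 from by
            unfold countSeqWithSumAndLength; rw [if_pos (by omega)]]
      ring

-- ===== VERDICT (by name: the statement is the Claim_ definition above) =====
theorem rank_within_sum_class_py_spec : Claim_equal_rank_within_sum_class_py := by
  intro seq _dom
  unfold Spec_rank_within_sum_class_py rank_within_sum_class_py rank_within_sum_class_py_alt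
  rcases seq with _ | ⟨e, tl⟩
  · rfl
  rcases tl with _ | ⟨e2, tl2⟩
  · -- singleton sequence: both sides are 0
    have hne : ([e] : List Int) ≠ [] := by simp
    rw [if_neg hne, if_neg hne]
    have h1 : ((([e] : List Int).length : Nat) : Int) = 1 := by norm_num
    rw [h1, PySem.List.pyRange_one_eq_nil le_rfl]
    simp only [List.filter_nil, List.map_nil, List.sum_nil, List.foldl_nil, List.foldl_cons]
    unfold rankWithinLengthClass
    rw [if_pos rfl]
    unfold pvStepB
    dsimp only
    rw [if_pos (by norm_num), if_neg (by simp)]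
    simp
  · -- length ≥ 2
    have hne : (e :: e2 :: tl2 : List Int) ≠ [] := by simp
    rw [if_neg hne, if_neg hne,
        base_eq ((e :: e2 :: tl2).sum + (((e :: e2 :: tl2).length : Nat) : Int))
          (PySem.List.pyRange 1 (((e :: e2 :: tl2).length : Nat) : Int) 1)
          (fun l hl => (PySem.List.mem_pyRange_one.mp hl).1) 0,
        zero_add]
    unfold rankWithinLengthClass
    have h1 : ¬ ((((e :: e2 :: tl2).length : Nat) : Int) = 1) := by simp; omega
    rw [if_neg h1, foldAB, add_comm, ← foldB_shift, zero_add]
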